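-- pv_equiv track=rewrite | github.com/PdxCodeGuild/class_kiwi | Code/lis/python/lab4.py | blackjack
-- ===== SOURCE A (Python) =====
-- card_values = {
--   'A':1,
--   '2':2,
--   '3':3,
--   '4':4,
--   '5':5,
--   '6':6,
--   '7':7,
--   '8':8,
--   '9':9,
--   '10':10,
--   'J':10,
--   'Q':10,
--   'K':10
-- }
--
-- def blackjack(first_card, second_card, third_card):
--
-- # get dictionary values and add together
--   if all (key in card_values for key in (first_card, second_card, third_card) ):
--     sum_value = (card_values.get(first_card) + card_values.get(second_card) + card_values.get(third_card))
--
--     # determine classification of added values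
--     if sum_value < 17:
--       return(f'{sum_value} Hit')
--     elif 17 <= sum_value < 21:
--       return(f'{sum_value} Stay')
--     elif sum_value == 21:
--       return(f'{sum_value} Blackjack!')
--     elif sum_value > 21:
--       return(f'{sum_value} Already Busted')
--     else:
--       return(f"Please enter a valid card value next time: {', '.join(card_values.keys())}")
-- ===== SOURCE B (Python) =====
-- card_values = {
--   'A':1,
--   '2':2,
--   '3':3,
--   '4':4,
--   '5':5,
--   '6':6,
--   '7':7,
--   '8':8,
--   '9':9,
--   '10':10,
--   'J':10,
--   'Q':10,
--   'K':10
-- }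
--
-- # Precompute every possible message once: valid sums range over 3..30.
-- _labels = ['Hit', 'Stay', 'Blackjack!', 'Already Busted']
-- _messages = {}
-- for _s in range(3, 31):
--     _i = (_s >= 17) + (_s >= 21) + (_s >= 22)
--     _messages[_s] = f'{_s} {_labels[_i]}'
--
-- def blackjack(first_card, second_card, third_card):
--     total = 0
--     for card in (first_card, second_card, third_card):
--         value = card_values.get(card)
--         if value is None:
--             return None
--         total += value
--     return _messages[total]
-- ===== Notes on version B (the rewrite author's own statement) =====
-- stated objective: alternative
-- what changed: Instead of validating all three cards up front and classifying the sum with a four-way if/elif chain, B walks the cards once with an accumulator and an early None return on the first unknown card, and then returns the answer from a message table precomputed at module load for every reachable sum 3..30.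
import Mathlib
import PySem

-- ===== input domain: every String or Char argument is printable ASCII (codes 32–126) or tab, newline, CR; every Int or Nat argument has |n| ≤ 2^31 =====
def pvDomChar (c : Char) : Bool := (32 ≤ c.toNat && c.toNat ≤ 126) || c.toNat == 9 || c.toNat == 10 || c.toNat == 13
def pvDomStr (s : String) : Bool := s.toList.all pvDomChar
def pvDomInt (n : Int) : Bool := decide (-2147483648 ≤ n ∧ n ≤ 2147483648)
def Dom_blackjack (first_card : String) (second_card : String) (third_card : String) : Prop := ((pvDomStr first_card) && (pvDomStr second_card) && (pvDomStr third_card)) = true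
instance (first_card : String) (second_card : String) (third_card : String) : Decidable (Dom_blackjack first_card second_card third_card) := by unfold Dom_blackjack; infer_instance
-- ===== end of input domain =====

-- B walks the three cards once with an accumulator and an early None return, then answers from a
-- message table precomputed for every reachable sum 3..30, instead of A's validate-all-then-if/elif chain.

-- ===== PORT A =====
-- module-level constant card_values (shared by both Python files verbatim)
def card_values : PySem.Dict String Int := PySem.Dict.ofList
  [("A",1),("2",2),("3",3),("4",4),("5",5),("6",6),("7",7),("8",8),("9",9),
   ("10",10),("J",10),("Q",10),("K",10)]

def blackjack (first_card : String) (second_card : String) (third_card : String) : Option String :=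
  -- if all(key in card_values for key in (first_card, second_card, third_card)):
  if (PySem.Dict.contains card_values first_card
      && PySem.Dict.contains card_values second_card
      && PySem.Dict.contains card_values third_card) then
    -- .get(k) returns Optional; the guard guarantees presence, so the addition is of the present values
    let sum_value : Int :=
      (PySem.Dict.get? card_values first_card).getD 0
      + (PySem.Dict.get? card_values second_card).getD 0
      + (PySem.Dict.get? card_values third_card).getD 0
    if sum_value < 17 then some (PySem.Int.toStr sum_value ++ " Hit")
    else if 17 ≤ sum_value ∧ sum_value < 21 then some (PySem.Int.toStr sum_value ++ " Stay")
    else if sum_value = 21 then some (PySem.Int.toStr sum_value ++ " Blackjack!")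
    else if sum_value > 21 then some (PySem.Int.toStr sum_value ++ " Already Busted")
    else some ("Please enter a valid card value next time: "
               ++ PySem.Str.join ", " (PySem.Dict.keys card_values))  -- dead else branch, ported literally
  else none  -- the outer if has no else: Python returns None

-- ===== PORT B =====
def pvLabels : List String := ["Hit", "Stay", "Blackjack!", "Already Busted"]

-- the message built for sum s: f'{_s} {_labels[_i]}' with _i = (_s>=17)+(_s>=21)+(_s>=22);
-- _labels[_i] always succeeds (_i ≤ 3), so getD "" is the total rendering of the list index
def pvMsg (s : Int) : String :=
  PySem.Int.toStr s ++ " " ++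
    (pvLabels[((if 17 ≤ s then 1 else 0) + (if 21 ≤ s then 1 else 0)
               + (if 22 ≤ s then 1 else 0) : Nat)]?).getD ""

-- module-load loop: for _s in range(3, 31): _messages[_s] = f'{_s} {_labels[_i]}'
def pvMessages : PySem.Dict Int String :=
  (PySem.List.pyRange 3 31 1).foldl (fun d s => d.insert s (pvMsg s)) PySem.Dict.empty

-- for card in (first, second, third): value = card_values.get(card); if None: return None; total += value
def pvSumCards : List String → Int → Option Int
  | [], total => some total
  | c :: rest, total =>
    match PySem.Dict.get? card_values c with
    | none => none
    | some v => pvSumCards rest (total + v)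

def blackjack_alt (first_card : String) (second_card : String) (third_card : String) : Option String :=
  match pvSumCards [first_card, second_card, third_card] 0 with
  | none => none
  -- _messages[total]: the key is always present (total ∈ 3..30), so getD "" is the total rendering
  | some total => some (PySem.Dict.getD pvMessages total "")

-- ===== PRECONDITION & SPEC =====
def Spec_blackjack (first_card : String) (second_card : String) (third_card : String) (out : Option String) : Prop := out = blackjack_alt first_card second_card third_card
instance (first_card : String) (second_card : String) (third_card : String) (out : Option String) : Decidable (Spec_blackjack first_card second_card third_card out) := by unfold Spec_blackjack; infer_instance

-- ===== CLAIM (what is proved, stated in full; the proofs are below) =====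
def Claim_equal_blackjack : Prop := ∀ (first_card : String) (second_card : String) (third_card : String), Dom_blackjack first_card second_card third_card → Spec_blackjack first_card second_card third_card (blackjack first_card second_card third_card)

-- ===== LEMMAS AND PROOFS =====

-- any value stored in card_values lies in [1, 10]
lemma card_value_bounds {c : String} {v : Int}
    (h : PySem.Dict.get? card_values c = some v) : 1 ≤ v ∧ v ≤ 10 := by
  have hmem : (c, v) ∈ card_values.items := PySem.Dict.mem_items_of_get?_eq_some _ h
  have hv : v ∈ card_values.items.map (·.2) := List.mem_map_of_mem hmem
  have hlist : card_values.items.map (·.2) = [1,2,3,4,5,6,7,8,9,10,10,10,10] := by rfl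
  rw [hlist] at hv
  fin_cases hv <;> omega

-- the message-table loop runs over fresh distinct keys, so its items list is the range, mapped
lemma items_pvMessages : pvMessages.items =
    (PySem.List.pyRange 3 31 1).map (fun s => (s, pvMsg s)) := by
  unfold pvMessages
  have := PySem.Dict.items_foldl_insert_fresh (d := (PySem.Dict.empty : PySem.Dict Int String))
    (l := PySem.List.pyRange 3 31 1) (k := fun s => s) (v := pvMsg)
    (by intro a _; simp [PySem.Dict.contains_empty])
    (by simpa using PySem.List.nodup_pyRange_one 3 31)
  simpa using this

-- every reachable sum is a key of the table, bound to its message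
lemma getD_pvMessages (v : Int) (h3 : 3 ≤ v) (h30 : v ≤ 30) :
    pvMessages.getD v "" = pvMsg v := by
  apply PySem.Dict.getD_of_mem_items
  · rw [items_pvMessages]
    exact List.mem_map_of_mem ((PySem.List.mem_pyRange_one).2 ⟨h3, by omega⟩)
  · have hk : pvMessages.keys = pvMessages.items.map (·.1) := rfl
    rw [hk, items_pvMessages, List.map_map]
    simpa [Function.comp] using PySem.List.nodup_pyRange_one 3 31

-- A's classification chain equals B's precomputed message table, for every reachable sum
lemma classify_eq_messages (v : Int) (h3 : 3 ≤ v) (h30 : v ≤ 30) :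
    (if v < 17 then some (PySem.Int.toStr v ++ " Hit")
     else if 17 ≤ v ∧ v < 21 then some (PySem.Int.toStr v ++ " Stay")
     else if v = 21 then some (PySem.Int.toStr v ++ " Blackjack!")
     else if v > 21 then some (PySem.Int.toStr v ++ " Already Busted")
     else some ("Please enter a valid card value next time: "
                ++ PySem.Str.join ", " (PySem.Dict.keys card_values)))
    = some (pvMessages.getD v "") := by
  rw [getD_pvMessages v h3 h30]
  unfold pvMsg
  by_cases h1 : v < 17
  · rw [if_pos h1, if_neg (by omega : ¬(17:Int) ≤ v), if_neg (by omega : ¬(21:Int) ≤ v),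
        if_neg (by omega : ¬(22:Int) ≤ v)]
    simp [pvLabels, String.append_assoc]
  · by_cases h2 : v < 21
    · rw [if_neg h1, if_pos ⟨by omega, h2⟩, if_pos (by omega : (17:Int) ≤ v),
          if_neg (by omega : ¬(21:Int) ≤ v), if_neg (by omega : ¬(22:Int) ≤ v)]
      simp [pvLabels, String.append_assoc]
    · by_cases h3' : v = 21
      · rw [if_neg h1, if_neg (by omega), if_pos h3', if_pos (by omega : (17:Int) ≤ v),
            if_pos (by omega : (21:Int) ≤ v), if_neg (by omega : ¬(22:Int) ≤ v)]
        simp [pvLabels, String.append_assoc]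
      · rw [if_neg h1, if_neg (by omega), if_neg h3', if_pos (by omega : v > 21),
            if_pos (by omega : (17:Int) ≤ v), if_pos (by omega : (21:Int) ≤ v),
            if_pos (by omega : (22:Int) ≤ v)]
        simp [pvLabels, String.append_assoc]

-- ===== VERDICT (by name: the statement is the Claim_ definition above) =====
theorem blackjack_spec : Claim_equal_blackjack := by
  intro f s t _
  unfold Spec_blackjack blackjack blackjack_alt
  simp only [PySem.Dict.contains_eq_isSome_get?, pvSumCards]
  cases hf : PySem.Dict.get? card_values f with
  | none => simp
  | some v1 =>
    cases hs : PySem.Dict.get? card_values s with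
    | none => simp
    | some v2 =>
      cases ht : PySem.Dict.get? card_values t with
      | none => simp
      | some v3 =>
        simp only [Option.isSome_some, Bool.and_self, if_true, Option.getD_some]
        obtain ⟨h1l, h1r⟩ := card_value_bounds hf
        obtain ⟨h2l, h2r⟩ := card_value_bounds hs
        obtain ⟨h3l, h3r⟩ := card_value_bounds ht
        have := classify_eq_messages (v1 + v2 + v3) (by omega) (by omega)
        simpa [zero_add] using this
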